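-- pv_equiv track=rewrite | github.com/shihjames/SC-Projects | stanCode_Projects/boggle_game_solver/boggle.py | input_error
-- ===== SOURCE A (Python) =====
-- def input_error(row):
-- 	"""
-- 	This function is used to check if any illegal format exists.
-- 	:param row: str, containing 4 letters with spaces between.
-- 	:return: True, if format correct. False, if illegal format.
-- 	"""
-- 	# Check the length.
-- 	if len(row) != 7:
-- 		return False
-- 	# Check whether the letters and spaces are in right order.
-- 	for i in range(7):
-- 		if i % 2 != 0:
-- 			if row[i] != ' ':
-- 				return False
-- 		if i % 2 == 0:
-- 			if not row[i].isalpha():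
-- 				return False
-- 	return True
-- ===== SOURCE B (Python) =====
-- def input_error(row):
-- 	"""
-- 	Check row format: 4 letters separated by single spaces (e.g. 'a b c d').
-- 	Slice-based: the odd positions must be exactly three spaces and the
-- 	even positions must form a 4-letter alphabetic string.
-- 	"""
-- 	return len(row) == 7 and row[1::2] == '   ' and row[0::2].isalpha()
-- ===== Notes on version B (the rewrite author's own statement) =====
-- stated objective: simpler
-- what changed: Replaced the index-parity loop with early returns by a single boolean expression on two stride-2 slices: odd positions must be all spaces and even positions must be an alphabetic 4-char string.
import Mathlib
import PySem

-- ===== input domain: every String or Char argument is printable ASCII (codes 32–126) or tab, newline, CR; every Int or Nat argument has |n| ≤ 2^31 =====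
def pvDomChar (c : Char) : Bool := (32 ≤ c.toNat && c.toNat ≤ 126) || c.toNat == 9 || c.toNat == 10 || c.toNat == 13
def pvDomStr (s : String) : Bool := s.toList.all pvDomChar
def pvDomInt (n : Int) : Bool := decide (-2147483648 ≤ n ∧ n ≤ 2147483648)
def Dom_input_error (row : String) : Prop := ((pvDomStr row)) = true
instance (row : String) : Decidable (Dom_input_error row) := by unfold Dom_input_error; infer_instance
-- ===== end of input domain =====

-- B replaces A's index-parity loop by one boolean expression over two stride-2 slices: odd positions all spaces, even positions a 4-letter alphabetic string (simpler decomposition, same cost).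


-- ===== PORT A =====
-- the 'for i in range(7)' loop with its early returns, over the index list
def inputErrorLoopA (cs : List Char) : List Int → Bool
  | [] => true
  | i :: rest =>
    if i % 2 ≠ 0 ∧ PySem.List.pyGetD cs i ' ' ≠ ' ' then false
    else if i % 2 = 0 ∧ ¬ (PySem.Chars.isalpha (PySem.List.pyGetD cs i ' ') = true) then false
    else inputErrorLoopA cs rest

def input_error (row : String) : Bool :=
  if row.toList.length ≠ 7 then false
  else inputErrorLoopA row.toList (PySem.List.pyRange 0 7 1)

-- ===== PORT B =====
-- row[1::2] / row[0::2]: step is the literal 2 ≠ 0, so slice? is always 'some'; .getD "" only discharges the Option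
def input_error_alt (row : String) : Bool :=
  decide (row.toList.length = 7)
    && (PySem.Chars.slice? row.toList (some 1) none 2 == some "   ".toList)
    && PySem.Chars.strIsalpha ((PySem.Chars.slice? row.toList (some 0) none 2).getD [])

-- ===== PRECONDITION & SPEC =====
def Spec_input_error (row : String) (out : Bool) : Prop := out = input_error_alt row
instance (row : String) (out : Bool) : Decidable (Spec_input_error row out) := by unfold Spec_input_error; infer_instance

-- ===== CLAIM (what is proved, stated in full; the proofs are below) =====
def Claim_equal_input_error : Prop := ∀ (row : String), Dom_input_error row → Spec_input_error row (input_error row)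

-- ===== LEMMAS AND PROOFS =====

-- ===== VERDICT (by name: the statement is the Claim_ definition above) =====
theorem input_error_spec : Claim_equal_input_error := by
  intro row _
  unfold Spec_input_error input_error input_error_alt
  have hr : PySem.List.pyRange 0 7 1 = [0, 1, 2, 3, 4, 5, 6] := by decide
  rw [hr]
  generalize row.toList = l
  rcases l with _ | ⟨c0, _ | ⟨c1, _ | ⟨c2, _ | ⟨c3, _ | ⟨c4, _ | ⟨c5, _ | ⟨c6, _ | ⟨c7, rest⟩⟩⟩⟩⟩⟩⟩⟩ <;>
    simp [inputErrorLoopA, PySem.List.pyGetD,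
      PySem.Chars.slice?, PySem.List.slice?, PySem.List.sliceIndices,
      PySem.Chars.strIsalpha]
  norm_num [List.range_succ]
  simp [beq_eq_decide, Bool.and_assoc, Bool.and_left_comm]
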